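-- pv_equiv track=rewrite | github.com/ledm/earthsystemmusic2 | music_utils.py | quantize_time
-- ===== SOURCE A (Python) =====
-- def quantize_time(times,  data):
-- 	"""
-- 	Extends each time and data point to the full extent.
-- 	"""
-- 	new_times = []
-- 	new_data = []
-- 	for i, t in enumerate(times):
--
-- 		if i == len(times) -1:
-- 			# Last time step
-- 			next_time = t + (t - times[i-1])
-- 		else:
-- 			next_time = times[i+1]
-- 		new_times.append(t)
-- 		new_times.append(next_time)
--
-- 		new_data.append(data[i])
-- 		new_data.append(data[i])
-- 	return new_times, new_data
-- ===== SOURCE B (Python) =====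
-- def quantize_time(times, data):
--     """
--     Extends each time and data point to the full extent.
--     Closed-form output shape: head, every later time doubled, one extrapolated end;
--     no pairing of each time with its successor.
--     """
--     if not times:
--         return [], []
--     def doubled(xs):
--         return [x for x in xs for _ in (0, 1)]
--     end = 2 * times[-1] - times[-2] if len(times) > 1 else times[-1]
--     return [times[0]] + doubled(times[1:]) + [end], doubled(data[:len(times)])
-- ===== Notes on version B (the rewrite author's own statement) =====
-- stated objective: simpler
-- what changed: B never pairs a time with its successor: it writes the output in its closed form - the first time, every later time emitted twice, then one extrapolated endpoint - so A's indexed loop with a per-element last-step branch (and any zip/interleave) disappears.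
import Mathlib
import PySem

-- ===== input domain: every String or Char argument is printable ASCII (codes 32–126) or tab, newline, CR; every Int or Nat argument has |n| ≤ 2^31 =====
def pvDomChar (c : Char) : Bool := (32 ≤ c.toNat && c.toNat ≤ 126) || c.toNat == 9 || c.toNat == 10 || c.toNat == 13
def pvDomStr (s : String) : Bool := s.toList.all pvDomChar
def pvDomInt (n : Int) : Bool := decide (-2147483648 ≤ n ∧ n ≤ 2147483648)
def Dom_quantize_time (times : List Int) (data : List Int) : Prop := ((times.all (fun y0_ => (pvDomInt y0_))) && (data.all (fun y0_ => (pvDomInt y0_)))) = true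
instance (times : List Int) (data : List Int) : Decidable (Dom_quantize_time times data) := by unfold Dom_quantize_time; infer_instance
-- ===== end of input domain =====

-- B builds the output from its closed-form shape — head, every later time doubled, one
-- extrapolated endpoint, data doubled — instead of A's indexed loop computing a successor
-- per element (objective: simpler; same O(n) cost).

-- ===== PORT A =====
def quantize_time (times : List Int) (data : List Int) : List Int × List Int :=
  (PySem.List.enumerate times).foldl
    (fun (st : List Int × List Int) (p : Int × Int) =>
      let i := p.1
      let t := p.2
      let next_time :=
        if i = (times.length : Int) - 1 then
          t + (t - PySem.List.pyGetD times (i - 1) 0)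
        else
          PySem.List.pyGetD times (i + 1) 0
      (st.1 ++ [t, next_time],
       st.2 ++ [PySem.List.pyGetD data i 0, PySem.List.pyGetD data i 0]))
    ([], [])

-- ===== PORT B =====
-- [x for x in xs for _ in (0, 1)]
def pvDoubled (xs : List Int) : List Int := xs.flatMap (fun x => [x, x])

def quantize_time_alt (times : List Int) (data : List Int) : List Int × List Int :=
  if times = [] then ([], [])
  else
    let e : Int :=
      if times.length > 1 then
        2 * PySem.List.pyGetD times (-1) 0 - PySem.List.pyGetD times (-2) 0
      else PySem.List.pyGetD times (-1) 0
    ([PySem.List.pyGetD times 0 0] ++ pvDoubled (PySem.List.slice times (some 1) none) ++ [e],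
     pvDoubled (PySem.List.slice data none (some (times.length : Int))))

-- ===== PRECONDITION & SPEC =====
-- A indexes data[i] for every i < len(times): it raises IndexError when data is shorter than times.
def Pre_quantize_time (times : List Int) (data : List Int) : Prop :=
  times.length ≤ data.length
instance (times : List Int) (data : List Int) : Decidable (Pre_quantize_time times data) := by unfold Pre_quantize_time; infer_instance
def pvWitness_quantize_time : List Int × List Int := ([1, 4, 9], [3, 5, 7])

def Spec_quantize_time (times : List Int) (data : List Int) (out : List Int × List Int) : Prop := out = quantize_time_alt times data
instance (times : List Int) (data : List Int) (out : List Int × List Int) : Decidable (Spec_quantize_time times data out) := by unfold Spec_quantize_time; infer_instance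

-- ===== CLAIM =====
def Claim_equal_quantize_time : Prop := ∀ (times : List Int) (data : List Int), Dom_quantize_time times data → Pre_quantize_time times data → Spec_quantize_time times data (quantize_time times data)

-- ===== LEMMAS AND PROOFS =====

-- A's loop body appends to both components; split it into two flatMaps.
theorem foldl_pair_append {α : Type} (f g : α → List Int) :
    ∀ (l : List α) (a b : List Int),
      l.foldl (fun st x => (st.1 ++ f x, st.2 ++ g x)) (a, b)
        = (a ++ l.flatMap f, b ++ l.flatMap g) := by
  intro l
  induction l with
  | nil => simp
  | cons x xs ih => intro a b; simp [ih, List.flatMap_cons]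

-- flattening the interleave of (x :: xs) with (xs ++ [e]) is x, each of xs doubled, then e
theorem interleave_zip_shift (xs : List Int) :
    ∀ (x e : Int),
      ((x :: xs).zip (xs ++ [e])).flatMap (fun p => [p.1, p.2])
        = x :: xs.flatMap (fun t => [t, t]) ++ [e] := by
  induction xs with
  | nil => intro x e; simp
  | cons y ys ih => intro x e; simp [ih y e]

-- A's per-step next_time, read off the list tail ++ [e]
theorem nexts_getElem? (times : List Int) (h : times ≠ []) (i : Nat) (hi : i < times.length) :
    (times.tail ++ [if times.length > 1
        then 2 * PySem.List.pyGetD times (-1) 0 - PySem.List.pyGetD times (-2) 0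
        else PySem.List.pyGetD times (-1) 0])[i]?
      = some (if (i : Int) = (times.length : Int) - 1 then
          times[i] + (times[i] - PySem.List.pyGetD times ((i : Int) - 1) 0)
        else PySem.List.pyGetD times ((i : Int) + 1) 0) := by
  have hpos : 0 < times.length := List.length_pos_of_ne_nil h
  have htail : times.tail.length = times.length - 1 := by simp
  by_cases hlast : i = times.length - 1
  · subst hlast
    rw [List.getElem?_append_right (by omega), htail]
    have hz : times.length - 1 - (times.length - 1) = 0 := by omega
    rw [hz]
    simp only [List.getElem?_cons_zero, Option.some.injEq]
    rw [if_pos (show ((times.length - 1 : Nat) : Int) = (times.length : Int) - 1 by omega)]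
    by_cases h1 : times.length > 1
    · rw [if_pos h1]
      rw [PySem.List.pyGetD_neg_one _ _ h]
      rw [PySem.List.pyGetD_neg_ofNat times 2 0 (by omega) (by omega)]
      have hc : ((times.length - 1 : Nat) : Int) - 1 = ((times.length - 2 : Nat) : Int) := by omega
      rw [hc, PySem.List.pyGetD_natCast]
      rw [List.getD_eq_getElem _ _ (by omega)]
      rw [List.getLast_eq_getElem]
      ring
    · have h1' : times.length = 1 := by omega
      rw [if_neg h1]
      rw [PySem.List.pyGetD_neg_one _ _ h]
      have hc : ((times.length - 1 : Nat) : Int) - 1 = (-1 : Int) := by omega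
      rw [hc, PySem.List.pyGetD_neg_one _ _ h]
      rw [List.getLast_eq_getElem]
      ring
  · rw [if_neg (show ¬((i : Nat) : Int) = (times.length : Int) - 1 by omega),
        List.getElem?_append_left (by omega)]
    have hc : ((i : Nat) : Int) + 1 = ((i + 1 : Nat) : Int) := by omega
    rw [hc, PySem.List.pyGetD_natCast]
    rw [List.getD_eq_getElem _ _ (by omega)]
    rw [List.getElem?_eq_getElem (by omega)]
    simp [List.getElem_tail]

-- ===== VERDICT =====
theorem quantize_time_spec : Claim_equal_quantize_time := by
  intro times data _ hpre
  unfold Pre_quantize_time at hpre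
  unfold Spec_quantize_time quantize_time quantize_time_alt
  rw [foldl_pair_append]
  by_cases h : times = []
  · subst h; simp [PySem.List.enumerate]
  · rw [if_neg h]
    simp only [List.nil_append]
    obtain ⟨x, xs, hx⟩ := List.exists_cons_of_ne_nil h
    have hpos : 0 < times.length := List.length_pos_of_ne_nil h
    set e : Int := if times.length > 1
        then 2 * PySem.List.pyGetD times (-1) 0 - PySem.List.pyGetD times (-2) 0
        else PySem.List.pyGetD times (-1) 0 with he
    refine Prod.ext ?_ ?_
    · show (PySem.List.enumerate times).flatMap (fun p =>
            [p.2, if p.1 = (times.length : Int) - 1 then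
                p.2 + (p.2 - PySem.List.pyGetD times (p.1 - 1) 0)
              else PySem.List.pyGetD times (p.1 + 1) 0])
        = [PySem.List.pyGetD times 0 0] ++ pvDoubled (PySem.List.slice times (some 1) none) ++ [e]
      have hz : times.zip (times.tail ++ [e])
          = (PySem.List.enumerate times).map (fun p =>
              (p.2, if p.1 = (times.length : Int) - 1 then
                  p.2 + (p.2 - PySem.List.pyGetD times (p.1 - 1) 0)
                else PySem.List.pyGetD times (p.1 + 1) 0)) := by
        apply List.ext_getElem
        · simp [PySem.List.length_enumerate]; omega
        · intro i h1 h2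
          have hi : i < times.length := by
            simp [PySem.List.length_enumerate] at h2; exact h2
          rw [List.getElem_zip, List.getElem_map, PySem.List.getElem_enumerate]
          have h0 := nexts_getElem? times h i hi
          rw [List.getElem?_eq_getElem (by simp; omega)] at h0
          have h0' := Option.some.inj h0
          simp only [zero_add]
          exact congrArg₂ Prod.mk rfl h0'
      have hflat : ((times.zip (times.tail ++ [e])).flatMap (fun p => [p.1, p.2]))
          = (PySem.List.enumerate times).flatMap (fun p =>
              [p.2, if p.1 = (times.length : Int) - 1 then
                  p.2 + (p.2 - PySem.List.pyGetD times (p.1 - 1) 0)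
                else PySem.List.pyGetD times (p.1 + 1) 0]) := by
        rw [hz, List.flatMap_map]
      rw [← hflat]
      rw [PySem.List.slice_from_one]
      rw [hx]
      show ((x :: xs).zip (xs ++ [e])).flatMap (fun p => [p.1, p.2])
        = [PySem.List.pyGetD (x :: xs) 0 0] ++ pvDoubled xs ++ [e]
      rw [interleave_zip_shift xs x e]
      simp [pvDoubled, PySem.List.pyGetD_zero_cons]
    · show (PySem.List.enumerate times).flatMap (fun p =>
            [PySem.List.pyGetD data p.1 0, PySem.List.pyGetD data p.1 0])
        = pvDoubled (PySem.List.slice data none (some (times.length : Int)))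
      rw [PySem.List.slice_to_natCast]
      have hd : data.take times.length
          = (PySem.List.enumerate times).map (fun p => PySem.List.pyGetD data p.1 0) := by
        apply List.ext_getElem
        · simp [PySem.List.length_enumerate]
          omega
        · intro i h1 h2
          have hi : i < times.length := by
            simp [PySem.List.length_enumerate] at h2; exact h2
          rw [List.getElem_take, List.getElem_map, PySem.List.getElem_enumerate]
          simp only [zero_add, PySem.List.pyGetD_natCast]
          rw [List.getD_eq_getElem _ _ (by omega)]
      rw [pvDoubled, hd, List.flatMap_map]
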